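-- pv_equiv track=rewrite | github.com/SKNETWORKS-FAMILY-AICAMP/SKN21-FINAL-5TEAM | chatbot/src/graph/nodes/policy_rag_subagent.py | _build_retrieval_attempts
-- ===== SOURCE A (Python) =====
-- def _build_retrieval_attempts(
--     query_variants: list[str],
--     inferred_categories: list[str],
-- ) -> list[dict[str, str]]:
--     """Tool schema 검증을 피하기 위해 None 값은 payload에서 제거한다."""
--     attempts: list[dict[str, str]] = []
--     seen: set[tuple[str, str | None]] = set()
--
--     for query in query_variants:
--         for category in inferred_categories:
--             key = (query, category)
--             if key not in seen:
--                 attempts.append({"query": query, "category": category})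
--                 seen.add(key)
--
--         key = (query, None)
--         if key not in seen:
--             attempts.append({"query": query})
--             seen.add(key)
--
--     return attempts
-- ===== SOURCE B (Python) =====
-- def _build_retrieval_attempts(
--     query_variants: list[str],
--     inferred_categories: list[str],
-- ) -> list[dict[str, str]]:
--     """Tool schema 검증을 피하기 위해 None 값은 payload에서 제거한다."""
--     unique_queries = list(dict.fromkeys(query_variants))
--     unique_categories = list(dict.fromkeys(inferred_categories))
--     return [
--         attempt
--         for q in unique_queries
--         for attempt in (
--             [{"query": q, "category": c} for c in unique_categories]
--             + [{"query": q}]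
--         )
--     ]
-- ===== Notes on version B (the rewrite author's own statement) =====
-- stated objective: simpler
-- what changed: B pre-deduplicates the queries and categories once with dict.fromkeys and then emits the payloads with a guard-free nested comprehension, instead of A's running seen-set of (query, category) tuples with a membership test and set insertion before every append.
import Mathlib
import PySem

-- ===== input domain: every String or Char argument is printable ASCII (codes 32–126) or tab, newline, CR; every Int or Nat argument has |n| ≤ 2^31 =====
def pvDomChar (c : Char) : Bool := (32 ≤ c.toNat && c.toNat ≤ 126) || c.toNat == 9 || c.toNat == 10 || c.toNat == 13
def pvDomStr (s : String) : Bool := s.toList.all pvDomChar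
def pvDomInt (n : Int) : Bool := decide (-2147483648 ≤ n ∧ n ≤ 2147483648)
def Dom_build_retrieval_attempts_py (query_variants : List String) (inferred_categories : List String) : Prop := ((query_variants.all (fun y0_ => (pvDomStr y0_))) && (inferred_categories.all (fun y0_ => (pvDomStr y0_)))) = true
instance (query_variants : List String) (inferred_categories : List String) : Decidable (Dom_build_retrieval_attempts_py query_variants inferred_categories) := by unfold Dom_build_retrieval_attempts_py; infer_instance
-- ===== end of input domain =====

-- B pre-deduplicates the queries and the categories once (dict.fromkeys) and emits the
-- payloads with a guard-free nested comprehension, replacing A's running seen-set of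
-- (query, category) tuples; same output, simpler decomposition (objective: simpler).

-- ===== PORT A =====
-- literal transliteration of A: one fold over query_variants carrying (attempts, seen);
-- per query an inner fold over inferred_categories guarded by the shared seen-set,
-- then the category-less entry guarded by the (query, None) key.
def build_retrieval_attempts_py (query_variants : List String) (inferred_categories : List String) : List (List (String × String)) :=
  (query_variants.foldl
    (fun (st : List (List (String × String)) × PySem.Set (String × Option String)) query =>
      let st1 := inferred_categories.foldl
        (fun (st : List (List (String × String)) × PySem.Set (String × Option String)) category =>
          if st.2.contains (query, some category) then st
          else (st.1 ++ [[("query", query), ("category", category)]], st.2.add (query, some category))) st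
      if st1.2.contains (query, (none : Option String)) then st1
      else (st1.1 ++ [[("query", query)]], st1.2.add (query, none)))
    ([], PySem.Set.empty)).1

-- ===== PORT B =====
-- literal transliteration of B: dict.fromkeys dedup (PySem.List.dedup) of both lists,
-- then a guard-free nested comprehension (flatMap/map).
def build_retrieval_attempts_py_alt (query_variants : List String) (inferred_categories : List String) : List (List (String × String)) :=
  let unique_queries := PySem.List.dedup query_variants
  let unique_categories := PySem.List.dedup inferred_categories
  unique_queries.flatMap (fun q =>
    unique_categories.map (fun c => [("query", q), ("category", c)]) ++ [[("query", q)]])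

-- ===== PRECONDITION & SPEC =====
def Spec_build_retrieval_attempts_py (query_variants : List String) (inferred_categories : List String) (out : List (List (String × String))) : Prop := out = build_retrieval_attempts_py_alt query_variants inferred_categories
instance (query_variants : List String) (inferred_categories : List String) (out : List (List (String × String))) : Decidable (Spec_build_retrieval_attempts_py query_variants inferred_categories out) := by unfold Spec_build_retrieval_attempts_py; infer_instance

-- ===== CLAIM (what is proved, stated in full; the proofs are below) =====
def Claim_equal_build_retrieval_attempts_py : Prop := ∀ (query_variants : List String) (inferred_categories : List String), Dom_build_retrieval_attempts_py query_variants inferred_categories → Spec_build_retrieval_attempts_py query_variants inferred_categories (build_retrieval_attempts_py query_variants inferred_categories)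

-- ===== LEMMAS AND PROOFS =====

-- A's loop state: (attempts so far, seen-set).
abbrev PvSt := List (List (String × String)) × PySem.Set (String × Option String)

-- the body of A's inner loop (definitionally the lambda in the port)
def pvInnerF (query : String) (st : PvSt) (category : String) : PvSt :=
  if st.2.contains (query, some category) then st
  else (st.1 ++ [[("query", query), ("category", category)]], st.2.add (query, some category))

-- the body of A's outer loop (definitionally the lambda in the port)
def pvOuterF (cats : List String) (st : PvSt) (query : String) : PvSt :=
  let st1 := cats.foldl (pvInnerF query) st
  if st1.2.contains (query, (none : Option String)) then st1
  else (st1.1 ++ [[("query", query)]], st1.2.add (query, none))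

-- running Set.add from an arbitrary start set appends exactly the fresh deduplicated elements
lemma pv_foldl_add_shift {α : Type} [BEq α] [LawfulBEq α] (xs : List α) :
    ∀ s : List α, xs.foldl PySem.Set.add s = s ++ (PySem.Set.ofList xs).filter (fun y => !(s.contains y)) := by
  induction xs with
  | nil => intro s; simp [PySem.Set.ofList]
  | cons x xs ih =>
    intro s
    have hx1 : PySem.Set.ofList (x :: xs) = List.foldl PySem.Set.add [x] xs := by
      simp [PySem.Set.ofList, PySem.Set.add, PySem.Set.empty, PySem.Set.contains]
    rw [List.foldl_cons, ih (PySem.Set.add s x), hx1, ih [x]]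
    by_cases hx : x ∈ s
    · have hsx : PySem.Set.add s x = s := by
        simp [PySem.Set.add, PySem.Set.contains, hx]
      rw [hsx]
      simp only [List.filter_append, List.filter_filter]
      rw [show List.filter (fun y => !s.contains y) [x] = [] from by simp [hx]]
      simp only [List.nil_append]
      congr 1
      apply List.filter_congr
      intro y _
      by_cases hyx : y = x
      · subst hyx; simp [hx]
      · simp [hyx]
    · have hsx : PySem.Set.add s x = s ++ [x] := by
        simp [PySem.Set.add, PySem.Set.contains, hx]
      rw [hsx]
      simp only [List.filter_append, List.filter_filter]
      rw [show List.filter (fun y => !s.contains y) [x] = [x] from by simp [hx]]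
      simp only [List.append_assoc, List.singleton_append]
      congr 2
      apply List.filter_congr
      intro y _
      by_cases hyx : y = x
      · subst hyx; simp
      · simp [hyx]
-- ofList on a cons: head first, then the deduplicated tail without the head
lemma pv_ofList_cons {α : Type} [BEq α] [LawfulBEq α] (x : α) (xs : List α) :
    PySem.Set.ofList (x :: xs) = x :: (PySem.Set.ofList xs).filter (fun y => !(y == x)) := by
  have h1 : PySem.Set.ofList (x :: xs) = List.foldl PySem.Set.add [x] xs := by
    simp [PySem.Set.ofList, PySem.Set.add, PySem.Set.empty, PySem.Set.contains]
  rw [h1, pv_foldl_add_shift]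
  simp

-- inner loop on a query all of whose keys are already seen: the state is unchanged
lemma pv_inner_stale (cats : List String) (q : String) :
    ∀ (st : PvSt), (∀ c ∈ cats, ((q, some c) : String × Option String) ∈ st.2) →
      cats.foldl (pvInnerF q) st = st := by
  induction cats with
  | nil => intro st _; rfl
  | cons c cats ih =>
    intro st h
    have hc : ((q, some c) : String × Option String) ∈ st.2 := h c (by simp)
    have hstep : pvInnerF q st c = st := by
      simp [pvInnerF, hc]
    rw [List.foldl_cons, hstep]
    exact ih st (fun c' hc' => h c' (by simp [hc']))

-- inner loop on a fresh query: appends one entry per fresh category, in order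
lemma pv_inner_fresh (q : String) (cats : List String) :
    ∀ (acc : List (List (String × String))) (seen : PySem.Set (String × Option String)) (seenC : List String),
      (∀ c : String, (((q, some c) : String × Option String) ∈ seen ↔ c ∈ seenC)) →
      (cats.foldl (pvInnerF q) (acc, seen)).1
        = acc ++ ((PySem.Set.ofList cats).filter (fun c => !(seenC.contains c))).map
            (fun c => [("query", q), ("category", c)])
      ∧ (∀ p : String × Option String,
          p ∈ (cats.foldl (pvInnerF q) (acc, seen)).2
            ↔ p ∈ seen ∨ (p.1 = q ∧ ∃ c ∈ cats, p.2 = some c)) := by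
  induction cats with
  | nil => intro acc seen seenC h; simp [PySem.Set.ofList]
  | cons c cats ih =>
    intro acc seen seenC h
    rw [pv_ofList_cons]
    by_cases hc : c ∈ seenC
    · have hmem : ((q, some c) : String × Option String) ∈ seen := (h c).2 hc
      have hstep : pvInnerF q (acc, seen) c = (acc, seen) := by
        simp [pvInnerF, hmem]
      rw [List.foldl_cons, hstep]
      obtain ⟨h1, h2⟩ := ih acc seen seenC h
      constructor
      · rw [h1]
        congr 2
        simp only [List.filter_cons]
        have : (seenC.contains c) = true := by simp [hc]
        simp only [this, Bool.not_true, List.filter_filter]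
        apply List.filter_congr
        intro y _
        by_cases hyc : y = c
        · subst hyc; simp [hc]
        · simp [hyc]
      · intro p
        rw [h2 p]
        constructor
        · rintro (hp | ⟨hp1, c', hc', hp2⟩)
          · exact Or.inl hp
          · exact Or.inr ⟨hp1, c', by simp [hc'], hp2⟩
        · rintro (hp | ⟨hp1, c', hc', hp2⟩)
          · exact Or.inl hp
          · rcases List.mem_cons.mp hc' with hcc | hcc
            · subst hcc
              left
              have : p = (q, some c') := by
                cases p; simp_all
              rw [this]; exact hmem
            · exact Or.inr ⟨hp1, c', hcc, hp2⟩
    · have hmem : ((q, some c) : String × Option String) ∉ seen := fun hm => hc ((h c).1 hm)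
      have hstep : pvInnerF q (acc, seen) c
          = (acc ++ [[("query", q), ("category", c)]], seen.add (q, some c)) := by
        simp [pvInnerF, hmem]
      rw [List.foldl_cons, hstep]
      have h' : ∀ c' : String, (((q, some c') : String × Option String) ∈ seen.add (q, some c) ↔ c' ∈ c :: seenC) := by
        intro c'
        rw [PySem.Set.mem_add]
        constructor
        · rintro (hp | hp)
          · exact List.mem_cons_of_mem _ ((h c').1 hp)
          · simp at hp; simp [hp]
        · intro hp
          rcases List.mem_cons.mp hp with hcc | hcc
          · subst hcc; right; rfl
          · exact Or.inl ((h c').2 hcc)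
      obtain ⟨h1, h2⟩ := ih (acc ++ [[("query", q), ("category", c)]]) (seen.add (q, some c)) (c :: seenC) h'
      constructor
      · rw [h1]
        simp only [List.filter_cons]
        have : (seenC.contains c) = false := by simp [hc]
        simp only [this, Bool.not_false, List.filter_filter, List.append_assoc,
          List.singleton_append]
        congr 3
        apply List.filter_congr
        intro y _
        by_cases hyc : y = c
        · subst hyc; simp
        · simp [hyc]
      · intro p
        rw [h2 p, PySem.Set.mem_add]
        constructor
        · rintro ((hp | hp) | ⟨hp1, c', hc', hp2⟩)
          · exact Or.inl hp
          · subst hp; exact Or.inr ⟨rfl, c, by simp, rfl⟩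
          · exact Or.inr ⟨hp1, c', by simp [hc'], hp2⟩
        · rintro (hp | ⟨hp1, c', hc', hp2⟩)
          · exact Or.inl (Or.inl hp)
          · rcases List.mem_cons.mp hc' with hcc | hcc
            · subst hcc
              left; right
              cases p; simp_all
            · exact Or.inr ⟨hp1, c', hcc, hp2⟩

-- outer loop: with a seen-set exactly describing the already-processed queries,
-- A appends one block per fresh deduplicated query
lemma pv_outer (cats : List String) (qs : List String) :
    ∀ (acc : List (List (String × String))) (seen : PySem.Set (String × Option String)) (seenQ : List String),
      (∀ p : String × Option String,
        p ∈ seen ↔ (p.1 ∈ seenQ ∧ ∀ c, p.2 = some c → c ∈ cats)) →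
      (qs.foldl (pvOuterF cats) (acc, seen)).1
        = acc ++ ((PySem.Set.ofList qs).filter (fun x => !(seenQ.contains x))).flatMap
            (fun q => (PySem.Set.ofList cats).map (fun c => [("query", q), ("category", c)])
                      ++ [[("query", q)]]) := by
  induction qs with
  | nil => intro acc seen seenQ _; simp [PySem.Set.ofList]
  | cons q qs ih =>
    intro acc seen seenQ h
    rw [pv_ofList_cons, List.foldl_cons]
    by_cases hq : q ∈ seenQ
    · -- q already fully processed: the whole step is a no-op
      have hall : ∀ c ∈ cats, ((q, some c) : String × Option String) ∈ seen := by
        intro c hc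
        exact (h (q, some c)).2 ⟨hq, fun c' hc' => by simp at hc'; subst hc'; exact hc⟩
      have hnone : ((q, (none : Option String)) : String × Option String) ∈ seen :=
        (h (q, none)).2 ⟨hq, fun c hc => by simp at hc⟩
      have hstep : pvOuterF cats (acc, seen) q = (acc, seen) := by
        unfold pvOuterF
        rw [pv_inner_stale cats q (acc, seen) hall]
        simp [hnone]
      rw [hstep, ih acc seen seenQ h]
      congr 1
      simp only [List.filter_cons]
      have : (seenQ.contains q) = true := by simp [hq]
      simp only [this, Bool.not_true, List.filter_filter]
      congr 1
      apply List.filter_congr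
      intro y _
      by_cases hyq : y = q
      · subst hyq; simp [hq]
      · simp [hyq]
    · -- fresh q: the inner loop emits one entry per deduplicated category, then the bare entry
      have hfresh : ∀ c : String, (((q, some c) : String × Option String) ∈ seen ↔ c ∈ ([] : List String)) := by
        intro c
        simp only [List.not_mem_nil, iff_false]
        intro hm
        exact hq ((h (q, some c)).1 hm).1
      obtain ⟨h1, h2⟩ := pv_inner_fresh q cats acc seen [] hfresh
      have hnone : ((q, (none : Option String)) : String × Option String)
          ∉ (cats.foldl (pvInnerF q) (acc, seen)).2 := by
        rw [h2]
        rintro (hp | ⟨_, c, _, hp2⟩)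
        · exact hq ((h (q, none)).1 hp).1
        · simp at hp2
      have hstep : pvOuterF cats (acc, seen) q
          = ((cats.foldl (pvInnerF q) (acc, seen)).1 ++ [[("query", q)]],
             (cats.foldl (pvInnerF q) (acc, seen)).2.add (q, none)) := by
        unfold pvOuterF
        simp [hnone]
      have h' : ∀ p : String × Option String,
          p ∈ (cats.foldl (pvInnerF q) (acc, seen)).2.add (q, none)
            ↔ (p.1 ∈ q :: seenQ ∧ ∀ c, p.2 = some c → c ∈ cats) := by
        intro p
        rw [PySem.Set.mem_add, h2]
        constructor
        · rintro ((hp | ⟨hp1, c, hc, hp2⟩) | hp)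
          · obtain ⟨hs, hcats⟩ := (h p).1 hp
            exact ⟨List.mem_cons_of_mem _ hs, hcats⟩
          · refine ⟨by simp [hp1], fun c' hc' => ?_⟩
            rw [hp2] at hc'; simp at hc'; subst hc'; exact hc
          · subst hp; exact ⟨by simp, fun c hc => by simp at hc⟩
        · rintro ⟨hs, hcats⟩
          rcases List.mem_cons.mp hs with hpq | hpq
          · rcases hp2 : p.2 with _ | c
            · right
              cases p; simp_all
            · left; right
              exact ⟨hpq, c, hcats c hp2, rfl⟩
          · left; left
            exact (h p).2 ⟨hpq, hcats⟩
      rw [hstep, ih _ _ (q :: seenQ) h', h1]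
      simp only [List.filter_cons]
      have : (seenQ.contains q) = false := by simp [hq]
      simp only [this, Bool.not_false, List.filter_filter, List.append_assoc,
        List.singleton_append]
      have hfilt : ∀ (l : List String),
          (l.filter fun y => !((q :: seenQ).contains y))
            = l.filter fun y => (!(seenQ.contains y)) && !(y == q) := by
        intro l
        apply List.filter_congr
        intro y _
        by_cases hyq : y = q
        · subst hyq; simp
        · simp [hyq]
      rw [hfilt]
      have hcat : ((PySem.Set.ofList cats).filter fun c => !(([] : List String).contains c))
          = PySem.Set.ofList cats := by
        simp
      rw [hcat]
      simp [List.append_assoc]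

-- ===== VERDICT (by name: the statement is the Claim_ definition above) =====
theorem build_retrieval_attempts_py_spec : Claim_equal_build_retrieval_attempts_py := by
  intro qs cats _
  show build_retrieval_attempts_py qs cats = build_retrieval_attempts_py_alt qs cats
  have hA : build_retrieval_attempts_py qs cats = (qs.foldl (pvOuterF cats) ([], PySem.Set.empty)).1 := rfl
  rw [hA, pv_outer cats qs [] PySem.Set.empty []
    (by intro p; simp [PySem.Set.empty])]
  simp [build_retrieval_attempts_py_alt, PySem.List.dedup_eq_ofList]
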